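-- pv_equiv track=rewrite | github.com/Mozeel-V/nebula-mini | src/eval/window_eval_plot.py | windows_by_events
-- ===== SOURCE A (Python) =====
-- def windows_by_events(text, events_per_window=16, stride_events=4):
--     toks = text.split()
--     api_idx = [i for i, t in enumerate(toks) if t.startswith("api:")]
--     if not api_idx:
--         # fallback: token windows
--         return windows_by_tokens(text, tokens_per_window=events_per_window*8,
--                                  stride_tokens=max(1, stride_events)*8)
--     starts = api_idx + [len(toks)]
--     events = [" ".join(toks[starts[i]:starts[i+1]]) for i in range(len(starts)-1)]
--     wins = []
--     for i in range(0, len(events), stride_events):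
--         seg = events[i:i+events_per_window]
--         if not seg: break
--         wins.append(" ".join(seg))
--     return wins
--
-- def windows_by_tokens(text, tokens_per_window=256, stride_tokens=64):
--     toks = text.split()
--     wins = []
--     for i in range(0, len(toks), stride_tokens):
--         seg = toks[i:i+tokens_per_window]
--         if not seg: break
--         wins.append(" ".join(seg))
--     return wins
-- ===== SOURCE B (Python) =====
-- def windows_by_events(text, events_per_window=16, stride_events=4):
--     # Streaming segmentation: one pass over the tokens keeps a running current
--     # segment and flushes it at each "api:" token, instead of building an index
--     # array and slicing between consecutive indices.
--     toks = text.split()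
--     events = []
--     cur = None
--     for t in toks:
--         if t.startswith("api:"):
--             if cur is not None:
--                 events.append(" ".join(cur))
--             cur = [t]
--         elif cur is not None:
--             cur.append(t)
--     if cur is not None:
--         events.append(" ".join(cur))
--     if not events:
--         return windows_by_tokens(text, events_per_window * 8,
--                                  max(1, stride_events) * 8)
--     wins = []
--     if stride_events > 0:
--         i = 0
--         n = len(events)
--         while i < n:
--             seg = events[i:i + events_per_window]
--             if not seg:
--                 break
--             wins.append(" ".join(seg))
--             i += stride_events
--     return wins
--
--
-- def windows_by_tokens(text, tokens_per_window=256, stride_tokens=64):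
--     toks = text.split()
--     wins = []
--     if stride_tokens > 0:
--         i = 0
--         n = len(toks)
--         while i < n:
--             seg = toks[i:i + tokens_per_window]
--             if not seg:
--                 break
--             wins.append(" ".join(seg))
--             i += stride_tokens
--     return wins
-- ===== Notes on version B (the rewrite author's own statement) =====
-- stated objective: alternative
-- what changed: Segmentation is done in one streaming pass that keeps a running current segment and flushes it at each 'api:' token (instead of building an index array of api positions and slicing between consecutive indices), and the window loop is a while-style iteration guarded by stride > 0 instead of range(0, n, stride).
import Mathlib
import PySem

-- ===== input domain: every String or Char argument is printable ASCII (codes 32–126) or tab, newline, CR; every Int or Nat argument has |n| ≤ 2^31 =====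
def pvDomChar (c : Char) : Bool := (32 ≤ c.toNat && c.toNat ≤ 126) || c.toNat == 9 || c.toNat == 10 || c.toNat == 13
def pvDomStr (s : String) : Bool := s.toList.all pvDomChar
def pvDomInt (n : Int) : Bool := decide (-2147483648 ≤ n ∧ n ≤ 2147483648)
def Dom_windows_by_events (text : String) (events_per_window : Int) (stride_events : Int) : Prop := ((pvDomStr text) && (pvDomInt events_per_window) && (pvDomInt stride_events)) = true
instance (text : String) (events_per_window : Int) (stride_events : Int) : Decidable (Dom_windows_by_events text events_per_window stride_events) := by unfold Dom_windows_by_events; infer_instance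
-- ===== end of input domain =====

-- B replaces A's index-array-plus-slicing segmentation by a single streaming pass
-- (running current segment, flushed at each "api:" token) and A's range-stride
-- window loop by a guarded while-style iteration; objective: alternative.

-- ===== PORT A =====
-- A's 'for i in range(0, n, stride): seg = xs[i:i+w]; if not seg: break; wins.append(" ".join(seg))' loop
def winsLoopA (events : List String) (epw : Int) (idxs : List Int) (wins : List String) : List String :=
  match idxs with
  | [] => wins
  | i :: rest =>
    let seg := PySem.List.slice events (some i) (some (i + epw))
    if seg = [] then wins
    else winsLoopA events epw rest (wins ++ [PySem.Str.join " " seg])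

def windows_by_tokens_A (text : String) (tokens_per_window : Int) (stride_tokens : Int) : List String :=
  let toks := PySem.Str.split₀ text
  winsLoopA toks tokens_per_window (PySem.List.pyRange 0 (toks.length : Int) stride_tokens) []

def windows_by_events (text : String) (events_per_window : Int) (stride_events : Int) : List String :=
  let toks := PySem.Str.split₀ text
  let api_idx := ((PySem.List.enumerate toks).filter (fun p => PySem.Str.startswith p.2 "api:")).map (·.1)
  if api_idx = [] then
    windows_by_tokens_A text (events_per_window * 8) (max 1 stride_events * 8)
  else
    let starts := api_idx ++ [(toks.length : Int)]
    let events := (PySem.List.pyRange 0 ((starts.length : Int) - 1) 1).map (fun i =>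
      PySem.Str.join " " (PySem.List.slice toks (some (PySem.List.pyGetD starts i 0)) (some (PySem.List.pyGetD starts (i + 1) 0))))
    winsLoopA events events_per_window (PySem.List.pyRange 0 (events.length : Int) stride_events) []

-- ===== PORT B =====
-- final flush of the running segment ('if cur is not None: events.append(" ".join(cur))')
def segFlush (st : List String × Option (List String)) : List String :=
  match st.2 with
  | some cur => st.1 ++ [PySem.Str.join " " cur]
  | none => st.1

-- one step of B's streaming pass over the tokens
def segStep (st : List String × Option (List String)) (t : String) : List String × Option (List String) :=
  if PySem.Str.startswith t "api:" then
    match st.2 with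
    | some cur => (st.1 ++ [PySem.Str.join " " cur], some [t])
    | none => (st.1, some [t])
  else
    match st.2 with
    | some cur => (st.1, some (cur ++ [t]))
    | none => st

-- B's 'i = 0; while i < n: seg = xs[i:i+w]; if not seg: break; ...; i += stride' loop
-- (entered only under the guard 0 < stride, which also gives termination)
def winsLoopB (events : List String) (epw : Int) (stride : Int) (hs : 0 < stride) (i : Int) (wins : List String) : List String :=
  if h : i < (events.length : Int) then
    let seg := PySem.List.slice events (some i) (some (i + epw))
    if seg = [] then wins
    else winsLoopB events epw stride hs (i + stride) (wins ++ [PySem.Str.join " " seg])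
  else wins
termination_by ((events.length : Int) - i).toNat
decreasing_by omega

def windows_by_tokens_B (text : String) (tokens_per_window : Int) (stride_tokens : Int) : List String :=
  let toks := PySem.Str.split₀ text
  if hs : 0 < stride_tokens then winsLoopB toks tokens_per_window stride_tokens hs 0 [] else []

def windows_by_events_alt (text : String) (events_per_window : Int) (stride_events : Int) : List String :=
  let toks := PySem.Str.split₀ text
  let events := segFlush (toks.foldl segStep ([], none))
  if events = [] then
    windows_by_tokens_B text (events_per_window * 8) (max 1 stride_events * 8)
  else if hs : 0 < stride_events then winsLoopB events events_per_window stride_events hs 0 [] else []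

-- ===== PRECONDITION & SPEC =====
-- Pre_ excludes only inputs on which A raises: stride_events == 0 while an "api:"
-- token is present makes A call range(0, n, 0), which raises ValueError.
def Pre_windows_by_events (text : String) (events_per_window : Int) (stride_events : Int) : Prop :=
  stride_events ≠ 0 ∨ (PySem.Str.split₀ text).all (fun t => !PySem.Str.startswith t "api:") = true
instance (text : String) (events_per_window : Int) (stride_events : Int) : Decidable (Pre_windows_by_events text events_per_window stride_events) := by unfold Pre_windows_by_events; infer_instance

def pvWitness_windows_by_events : String × Int × Int := ("api:open x y api:read z api:close", 2, 1)

def Spec_windows_by_events (text : String) (events_per_window : Int) (stride_events : Int) (out : List String) : Prop := out = windows_by_events_alt text events_per_window stride_events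
instance (text : String) (events_per_window : Int) (stride_events : Int) (out : List String) : Decidable (Spec_windows_by_events text events_per_window stride_events out) := by unfold Spec_windows_by_events; infer_instance

-- ===== CLAIM (what is proved, stated in full; the proofs are below) =====
def Claim_equal_windows_by_events : Prop := ∀ (text : String) (events_per_window : Int) (stride_events : Int), Dom_windows_by_events text events_per_window stride_events → Pre_windows_by_events text events_per_window stride_events → Spec_windows_by_events text events_per_window stride_events (windows_by_events text events_per_window stride_events)


-- ===== LEMMAS AND PROOFS =====

-- shorthand for the token test
def isApi (t : String) : Bool := PySem.Str.startswith t "api:"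

-- specification-level segmentation: the "api:"-led token segments
def segsFrom (cur : List String) : List String → List (List String)
  | [] => [cur]
  | t :: ts => if isApi t then cur :: segsFrom [t] ts else segsFrom (cur ++ [t]) ts

def segs : List String → List (List String)
  | [] => []
  | t :: ts => if isApi t then segsFrom [t] ts else segs ts

-- A's api-index list, named for the proofs
def apiIdxF (toks : List String) : List Int :=
  ((PySem.List.enumerate toks).filter (fun p => PySem.Str.startswith p.2 "api:")).map (·.1)

-- the zip-of-consecutive-starts event list, named for the proofs
def pairsEvents (toks : List String) (starts : List Int) : List String :=
  (starts.zip starts.tail).map (fun p => PySem.Str.join " " (PySem.List.slice toks (some p.1) (some p.2)))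

-- B side: the foldl realises segsFrom / segs
lemma foldl_segStep_some (ts : List String) : ∀ (evs : List String) (cur : List String),
    segFlush (ts.foldl segStep (evs, some cur)) = evs ++ (segsFrom cur ts).map (PySem.Str.join " ") := by
  induction ts with
  | nil => intro evs cur; simp [segFlush, segsFrom]
  | cons t ts ih =>
    intro evs cur
    by_cases h : isApi t
    · simp [segStep, segsFrom, isApi] at h ⊢
      rw [if_pos h, if_pos h, ih]
      simp
    · simp [isApi] at h
      simp only [List.foldl_cons, segStep, segsFrom, isApi]
      rw [if_neg (by simp [h]), ih]
      simp [h]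

lemma foldl_segStep_none (ts : List String) : ∀ (evs : List String),
    segFlush (ts.foldl segStep (evs, none)) = evs ++ (segs ts).map (PySem.Str.join " ") := by
  induction ts with
  | nil => intro evs; simp [segFlush, segs]
  | cons t ts ih =>
    intro evs
    by_cases h : isApi t
    · simp only [List.foldl_cons, segStep]
      rw [if_pos (by simpa [isApi] using h)]
      simp only [segs]
      rw [if_pos h, foldl_segStep_some]
    · simp only [List.foldl_cons, segStep]
      rw [if_neg (by simpa [isApi] using h)]
      simp only [segs]
      rw [if_neg (by simp [h]), ih]

-- A side: the enumerate-filter index list, structurally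
lemma enum_filter_shift {α : Type} (p : α → Bool) (ts : List α) : ∀ (s : Int),
    ((PySem.List.enumerate ts (s + 1)).filter (fun pr => p pr.2)).map (·.1)
      = (((PySem.List.enumerate ts s).filter (fun pr => p pr.2)).map (·.1)).map (· + 1) := by
  induction ts with
  | nil => intro s; simp [PySem.List.enumerate]
  | cons t ts ih =>
    intro s
    rw [PySem.List.enumerate_cons, PySem.List.enumerate_cons]
    by_cases h : p t
    · simp only [List.filter_cons, h, if_pos, List.map_cons]
      rw [ih (s + 1)]
    · simp only [List.filter_cons]
      rw [if_neg h, if_neg h, ih (s + 1)]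

lemma apiIdxF_cons (t : String) (ts : List String) :
    apiIdxF (t :: ts) = if isApi t then 0 :: (apiIdxF ts).map (· + 1) else (apiIdxF ts).map (· + 1) := by
  unfold apiIdxF
  rw [PySem.List.enumerate_cons]
  have key := enum_filter_shift (fun t => PySem.Str.startswith t "api:") ts 0
  by_cases h : PySem.Str.startswith t "api:"
  · rw [if_pos (by simp only [isApi]; exact h)]
    simp only [List.filter_cons, h, if_pos, List.map_cons]
    exact congrArg _ key
  · rw [if_neg (by simp only [isApi, h]; exact Bool.false_ne_true)]
    simp only [List.filter_cons]
    rw [if_neg h]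
    exact key

lemma segsFrom_ne_nil (ts : List String) : ∀ (cur : List String), segsFrom cur ts ≠ [] := by
  induction ts with
  | nil => intro cur; simp [segsFrom]
  | cons t ts ih =>
    intro cur
    simp only [segsFrom]
    split
    · simp
    · exact ih (cur ++ [t])

lemma apiIdxF_nonneg (ts : List String) : ∀ x ∈ apiIdxF ts, 0 ≤ x := by
  induction ts with
  | nil => simp [apiIdxF, PySem.List.enumerate]
  | cons t ts ih =>
    rw [apiIdxF_cons]
    by_cases h : isApi t
    · simp only [h, if_pos]
      intro x hx
      rcases List.mem_cons.1 hx with rfl | hx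
      · norm_num
      · obtain ⟨y, hy, rfl⟩ := List.mem_map.1 hx
        have := ih y hy; omega
    · rw [if_neg (by simp [h])]
      intro x hx
      obtain ⟨y, hy, rfl⟩ := List.mem_map.1 hx
      have := ih y hy; omega

lemma apiIdxF_nil_iff (ts : List String) : apiIdxF ts = [] ↔ segs ts = [] := by
  induction ts with
  | nil => simp [apiIdxF, PySem.List.enumerate, segs]
  | cons t ts ih =>
    rw [apiIdxF_cons]
    by_cases h : isApi t
    · rw [if_pos h]
      simp only [segs, h, if_pos]
      constructor
      · intro hc; exact absurd hc (by simp)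
      · intro hc; exact absurd hc (segsFrom_ne_nil ts [t])
    · rw [if_neg (by simp [h])]
      simp only [segs]
      rw [if_neg (by simp [h])]
      simp [ih]

lemma all_not_api_apiIdxF (ts : List String) (h : ts.all (fun t => !PySem.Str.startswith t "api:") = true) :
    apiIdxF ts = [] := by
  induction ts with
  | nil => simp [apiIdxF, PySem.List.enumerate]
  | cons t ts ih =>
    simp only [List.all_cons, Bool.and_eq_true, Bool.not_eq_true'] at h
    rw [apiIdxF_cons, if_neg (by simp only [isApi, h.1]; exact Bool.false_ne_true), ih h.2]
    simp

-- segmentation: spec-level characterisations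
lemma segsFrom_eq (ts : List String) : ∀ (cur : List String),
    segsFrom cur ts = (cur ++ ts.takeWhile (fun t => !isApi t)) :: segs (ts.dropWhile (fun t => !isApi t)) := by
  induction ts with
  | nil => intro cur; simp [segsFrom, segs]
  | cons t ts ih =>
    intro cur
    by_cases h : isApi t
    · rw [List.takeWhile_cons_of_neg (by simp [h]), List.dropWhile_cons_of_neg (by simp [h])]
      simp only [segsFrom, h, if_pos, List.append_nil, segs]
    · rw [List.takeWhile_cons_of_pos (by simp [h]), List.dropWhile_cons_of_pos (by simp [h])]
      simp only [segsFrom]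
      rw [if_neg (by simp [h]), ih (cur ++ [t])]
      simp

lemma segs_dropWhile (ts : List String) : segs (ts.dropWhile (fun t => !isApi t)) = segs ts := by
  induction ts with
  | nil => simp
  | cons t ts ih =>
    by_cases h : isApi t
    · rw [List.dropWhile_cons_of_neg (by simp [h])]
    · rw [List.dropWhile_cons_of_pos (by simp [h]), ih]
      simp only [segs]
      rw [if_neg (by simp [h])]

lemma starts_head (ts : List String) :
    (apiIdxF ts ++ [(ts.length : Int)]).head? = some ((ts.takeWhile (fun t => !isApi t)).length : Int) := by
  induction ts with
  | nil => simp [apiIdxF, PySem.List.enumerate]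
  | cons t ts ih =>
    rw [apiIdxF_cons]
    by_cases h : isApi t
    · rw [if_pos h, List.takeWhile_cons_of_neg (by simp [h])]
      simp
    · rw [if_neg (by simp [h]), List.takeWhile_cons_of_pos (by simp [h])]
      have e1 : ((t :: ts).length : Int) = (ts.length : Int) + 1 := by
        simp [List.length_cons]
      have e2 : (apiIdxF ts).map (· + 1) ++ [((t :: ts).length : Int)]
          = ((apiIdxF ts) ++ [(ts.length : Int)]).map (· + 1) := by
        rw [e1]; simp
      rw [e2, List.head?_map, ih]
      simp [List.length_cons]

-- A's pair comprehension over consecutive starts[i] = zip with the tail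
lemma range_pairs_eq_zip {α : Type} (l : List Int) (d : Int) (f : Int → Int → α) :
    (PySem.List.pyRange 0 ((l.length : Int) - 1) 1).map (fun i => f (PySem.List.pyGetD l i d) (PySem.List.pyGetD l (i + 1) d))
      = (l.zip l.tail).map (fun p => f p.1 p.2) := by
  apply List.ext_getElem
  · simp only [List.length_map, PySem.List.length_pyRange_one, List.length_zip, List.length_tail]
    omega
  · intro k h1 h2
    simp only [List.getElem_map]
    have hk : k < l.length - 1 := by
      simp only [List.length_map, PySem.List.length_pyRange_one] at h1
      omega
    rw [PySem.List.getElem_pyRange_one]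
    have g1 : PySem.List.pyGetD l ((0 : Int) + (k : Int)) d = l[k]'(by omega) := by
      rw [PySem.List.pyGetD_eq_getElem l d (by omega) (by exact_mod_cast (by omega : ((0:Int) + k) < (l.length : Int)))]
      congr 1
      omega
    have g2 : PySem.List.pyGetD l ((0 : Int) + (k : Int) + 1) d = l[k + 1]'(by omega) := by
      rw [PySem.List.pyGetD_eq_getElem l d (by omega) (by omega)]
      congr 1
      omega
    rw [g1, g2]
    have hz : (l.zip l.tail)[k]'(by simp only [List.length_map] at h2; exact h2)
        = (l[k]'(by omega), l[k+1]'(by omega)) := by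
      rw [List.getElem_zip]
      congr 1
      rw [List.getElem_tail]
    rw [hz]

-- slices of a cons at shifted indices
lemma slice_shift {α : Type} (t : α) (ts : List α) {a b : Int} (ha : 0 ≤ a) (hb : 0 ≤ b) :
    PySem.List.slice (t :: ts) (some (a + 1)) (some (b + 1)) = PySem.List.slice ts (some a) (some b) := by
  rw [PySem.List.slice_toNat _ (by omega) (by omega), PySem.List.slice_toNat _ ha hb]
  have e1 : (a + 1).toNat = a.toNat + 1 := by omega
  have e2 : (b + 1).toNat = b.toNat + 1 := by omega
  rw [e1, e2]
  simp only [List.drop_succ_cons]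
  congr 1
  omega

lemma slice_head {α : Type} (t : α) (ts : List α) {b : Int} (hb : 0 ≤ b) :
    PySem.List.slice (t :: ts) (some 0) (some (b + 1)) = t :: ts.take b.toNat := by
  rw [PySem.List.slice_toNat _ (by omega) (by omega)]
  have e2 : (b + 1).toNat = b.toNat + 1 := by omega
  simp [e2, List.take_succ_cons]

lemma mem_starts_nonneg (ts : List String) : ∀ x ∈ apiIdxF ts ++ [(ts.length : Int)], 0 ≤ x := by
  intro x hx
  rcases List.mem_append.1 hx with h | h
  · exact apiIdxF_nonneg ts x h
  · simp at h; omega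

lemma pairsEvents_cons (toks : List String) (x y : Int) (rest : List Int) :
    pairsEvents toks (x :: y :: rest)
      = PySem.Str.join " " (PySem.List.slice toks (some x) (some y)) :: pairsEvents toks (y :: rest) := by
  rfl

lemma pairsEvents_shift (t : String) (ts : List String) (S : List Int)
    (hS : ∀ x ∈ S, 0 ≤ x) :
    pairsEvents (t :: ts) (S.map (· + 1)) = pairsEvents ts S := by
  unfold pairsEvents
  rw [← List.map_tail, List.zip_map]
  rw [List.map_map]
  apply List.map_congr_left
  intro p hp
  obtain ⟨a, b⟩ := p
  obtain ⟨ha, hb⟩ := List.of_mem_zip hp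
  have h1 : 0 ≤ a := hS a ha
  have h2 : 0 ≤ b := hS b (List.mem_of_mem_tail hb)
  simp only [Function.comp_apply, Prod.map_apply]
  rw [slice_shift t ts h1 h2]

-- the central segmentation equivalence: A's consecutive-starts slices ARE the segments
lemma pairsEvents_segs (toks : List String) :
    pairsEvents toks (apiIdxF toks ++ [(toks.length : Int)]) = (segs toks).map (PySem.Str.join " ") := by
  induction toks with
  | nil =>
    simp [apiIdxF, PySem.List.enumerate, pairsEvents, segs]
  | cons t ts ih =>
    have hlen : ((t :: ts).length : Int) = (ts.length : Int) + 1 := by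
      simp [List.length_cons]
    have hM : (apiIdxF ts).map (· + 1) ++ [((t :: ts).length : Int)]
        = ((apiIdxF ts) ++ [(ts.length : Int)]).map (· + 1) := by rw [hlen]; simp
    rw [apiIdxF_cons]
    by_cases h : isApi t
    · rw [if_pos h]
      set S := apiIdxF ts ++ [(ts.length : Int)] with hSdef
      obtain ⟨s0, S', hS⟩ : ∃ s0 S', S = s0 :: S' := by
        rcases hc : S with _ | ⟨s0, S'⟩
        · rw [hSdef] at hc; exact absurd hc (by simp)
        · exact ⟨s0, S', rfl⟩
      have hs0 : s0 = ((ts.takeWhile (fun t => !isApi t)).length : Int) := by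
        have hh := starts_head ts
        rw [← hSdef, hS] at hh
        simpa using hh
      rw [List.cons_append, hM, hS]
      simp only [List.map_cons]
      rw [pairsEvents_cons]
      have hback : (s0 + 1) :: List.map (· + 1) S' = List.map (· + 1) S := by
        rw [hS]; simp
      rw [hback, pairsEvents_shift t ts S (by rw [hSdef]; exact mem_starts_nonneg ts), ih]
      have htake : PySem.List.slice (t :: ts) (some 0) (some (s0 + 1))
          = t :: ts.takeWhile (fun t => !isApi t) := by
        rw [slice_head t ts (by rw [hs0]; positivity)]
        congr 1
        have : s0.toNat = (ts.takeWhile (fun t => !isApi t)).length := by omega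
        rw [this]
        exact (List.prefix_iff_eq_take.1 (List.takeWhile_prefix _)).symm
      rw [htake]
      simp only [segs, h, if_pos]
      rw [segsFrom_eq ts [t]]
      simp only [List.map_cons, List.singleton_append]
      rw [segs_dropWhile]
    · rw [if_neg (by simp [h])]
      rw [hM, pairsEvents_shift t ts _ (mem_starts_nonneg ts), ih]
      simp only [segs]
      rw [if_neg (by simp [h])]

-- pyRange induction forms for a general positive step, and the negative-step nil
lemma pyRange_pos_nil {a b s : Int} (hs : 0 < s) (h : b ≤ a) :
    PySem.List.pyRange a b s = [] := by
  rw [PySem.List.pyRange_of_pos a b hs, if_neg (by omega)]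
  simp

lemma pyRange_neg_nil {a b s : Int} (hs : s < 0) (h : a ≤ b) :
    PySem.List.pyRange a b s = [] := by
  unfold PySem.List.pyRange
  rw [if_neg (by omega)]
  simp only [if_neg (by omega : ¬ (0 : Int) < s), if_neg (by omega : ¬ b < a)]
  simp

lemma pyRange_pos_cons {a b s : Int} (hs : 0 < s) (h : a < b) :
    PySem.List.pyRange a b s = a :: PySem.List.pyRange (a + s) b s := by
  rw [PySem.List.pyRange_of_pos a b hs, PySem.List.pyRange_of_pos (a + s) b hs]
  have key : (if a < b then ((b - a + s - 1) / s).toNat else 0)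
      = (if a + s < b then ((b - (a + s) + s - 1) / s).toNat else 0) + 1 := by
    rw [if_pos h]
    by_cases h2 : a + s < b
    · rw [if_pos h2]
      have e1 : b - a + s - 1 = (b - a - 1) + 1 * s := by ring
      rw [e1, Int.add_mul_ediv_right _ _ (by omega : s ≠ 0)]
      have e2 : b - (a + s) + s - 1 = b - a - 1 := by ring
      rw [e2]
      have : 0 ≤ (b - a - 1) / s := Int.ediv_nonneg (by omega) (by omega)
      omega
    · rw [if_neg h2]
      have e1 : b - a + s - 1 = (b - a - 1) + 1 * s := by ring
      rw [e1, Int.add_mul_ediv_right _ _ (by omega : s ≠ 0)]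
      have : (b - a - 1) / s = 0 := Int.ediv_eq_zero_of_lt (by omega) (by omega)
      omega
  rw [key, List.range_succ_eq_map]
  simp only [List.map_cons, List.map_map]
  refine List.cons_eq_cons.mpr ⟨by simp, ?_⟩
  apply List.map_congr_left
  intro k _
  simp [Function.comp, Nat.succ_eq_add_one]
  ring

-- the two window loops agree (for a positive stride; n bounds the remaining length)
lemma loopAB (events : List String) (epw stride : Int) (hs : 0 < stride) :
    ∀ (n : Nat) (i : Int) (wins : List String), ((events.length : Int) - i).toNat ≤ n →
      winsLoopA events epw (PySem.List.pyRange i (events.length : Int) stride) wins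
        = winsLoopB events epw stride hs i wins := by
  intro n
  induction n with
  | zero =>
    intro i wins hn
    rw [pyRange_pos_nil hs (by omega), winsLoopB, dif_neg (by omega)]
    rfl
  | succ n ih =>
    intro i wins hn
    by_cases h : i < (events.length : Int)
    · rw [pyRange_pos_cons hs h, winsLoopB, dif_pos h]
      simp only [winsLoopA]
      split
      · rfl
      · exact ih (i + stride) _ (by omega)
    · rw [pyRange_pos_nil hs (by omega), winsLoopB, dif_neg h]
      rfl

lemma tokens_AB (text : String) (tpw st : Int) (hst : 0 < st) :
    windows_by_tokens_A text tpw st = windows_by_tokens_B text tpw st := by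
  unfold windows_by_tokens_A windows_by_tokens_B
  rw [dif_pos hst]
  exact loopAB _ tpw st hst ((PySem.Str.split₀ text).length) 0 [] (by omega)

-- ===== VERDICT (by name: the statement is the Claim_ definition above) =====
theorem windows_by_events_spec : Claim_equal_windows_by_events := by
  intro text epw stride _dom hpre
  unfold Spec_windows_by_events
  simp only [windows_by_events, windows_by_events_alt]
  set toks := PySem.Str.split₀ text with htoks
  have hEvB : segFlush (toks.foldl segStep ([], none)) = (segs toks).map (PySem.Str.join " ") :=
    foldl_segStep_none toks []
  have hApi : ((PySem.List.enumerate toks).filter (fun p => PySem.Str.startswith p.2 "api:")).map (·.1)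
      = apiIdxF toks := rfl
  rw [hApi, hEvB]
  by_cases hA : apiIdxF toks = []
  · rw [if_pos hA, if_pos (by rw [(apiIdxF_nil_iff toks).1 hA]; simp)]
    exact tokens_AB text (epw * 8) (max 1 stride * 8) (by positivity)
  · rw [if_neg hA]
    have hEvA : (PySem.List.pyRange 0 (((apiIdxF toks ++ [(toks.length : Int)]).length : Int) - 1) 1).map (fun i =>
        PySem.Str.join " " (PySem.List.slice toks (some (PySem.List.pyGetD (apiIdxF toks ++ [(toks.length : Int)]) i 0)) (some (PySem.List.pyGetD (apiIdxF toks ++ [(toks.length : Int)]) (i + 1) 0))))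
        = (segs toks).map (PySem.Str.join " ") := by
      have hz := range_pairs_eq_zip (apiIdxF toks ++ [(toks.length : Int)]) 0
        (fun a b => PySem.Str.join " " (PySem.List.slice toks (some a) (some b)))
      rw [hz]
      exact pairsEvents_segs toks
    rw [hEvA]
    have hne : (segs toks).map (PySem.Str.join " ") ≠ [] := by
      intro hc
      exact hA ((apiIdxF_nil_iff toks).2 (by simpa using hc))
    rw [if_neg hne]
    by_cases hst : 0 < stride
    · rw [dif_pos hst]
      exact loopAB _ epw stride hst ((segs toks).map (PySem.Str.join " ")).length 0 [] (by omega)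
    · rw [dif_neg hst]
      have hz : stride ≠ 0 := by
        rcases hpre with h | h
        · exact h
        · exact absurd (all_not_api_apiIdxF toks h) hA
      rw [pyRange_neg_nil (by omega) (by positivity)]
      rfl
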